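-- pv_equiv track=rewrite | github.com/valik94/PythonProblems | labs109.py | words_with_given_shape
-- ===== SOURCE A (Python) =====
-- def words_with_given_shape(words, shape):
--     result = []
--     for w in words:
--         if len(w) != len(shape) + 1:
--             continue
--         for i in range(len(w) - 1):
--             sign = ord(w[i+1]) - ord(w[i])
--             if sign < 0 and shape[i] != -1:
--                 break
--             if sign == 0 and shape[i] != 0:
--                 break
--             if sign > 0 and shape[i] != 1:
--                 break
--         else:
--             result.append(w)
--     return result
-- ===== SOURCE B (Python) =====
-- def words_with_given_shape(words, shape):
--     # Index every word by its full rise/level/fall signature, then answer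
--     # with one lookup.  (An empty word matches no shape: it has no characters.)
--     index = {}
--     for w in words:
--         if w:
--             key = tuple((ord(b) > ord(a)) - (ord(b) < ord(a)) for a, b in zip(w, w[1:]))
--             index.setdefault(key, []).append(w)
--     return index.get(tuple(shape), [])
-- ===== Notes on version B (the rewrite author's own statement) =====
-- stated objective: alternative
-- what changed: Instead of comparing each word against shape with an early-break loop, B builds a dictionary grouping all words by their full rise/level/fall signature in one pass and returns the bucket found by a single lookup of tuple(shape), so no per-word comparison with shape ever happens.
import Mathlib
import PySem

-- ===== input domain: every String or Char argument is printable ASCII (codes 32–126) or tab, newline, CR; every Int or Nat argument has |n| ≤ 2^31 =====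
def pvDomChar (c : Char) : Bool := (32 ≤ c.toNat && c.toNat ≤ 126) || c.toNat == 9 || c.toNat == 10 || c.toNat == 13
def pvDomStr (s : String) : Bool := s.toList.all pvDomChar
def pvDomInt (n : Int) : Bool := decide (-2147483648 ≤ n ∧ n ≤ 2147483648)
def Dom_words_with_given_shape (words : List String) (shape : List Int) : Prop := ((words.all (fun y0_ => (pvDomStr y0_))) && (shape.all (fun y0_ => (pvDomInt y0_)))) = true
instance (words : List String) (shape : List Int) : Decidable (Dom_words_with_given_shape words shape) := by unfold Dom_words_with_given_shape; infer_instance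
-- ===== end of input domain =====

-- B replaces A's per-word early-break comparison against shape by indexing all words
-- into a signature-keyed dictionary in one pass and answering with a single lookup
-- (objective: alternative algorithm, same asymptotic cost).

-- ===== PORT A =====
-- the inner 'for i in range(len(w)-1)' loop with its three break tests, walking the
-- adjacent pairs of w alongside shape (the length guard guarantees shape[i] exists)
def pvLoopA : List Char → List Int → Bool
  | a :: b :: rest, s :: ss =>
      let sign : Int := (b.toNat : Int) - (a.toNat : Int)
      if sign < 0 ∧ s ≠ -1 then false
      else if sign = 0 ∧ s ≠ 0 then false
      else if sign > 0 ∧ s ≠ 1 then false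
      else pvLoopA (b :: rest) ss
  | _, _ => true

def words_with_given_shape (words : List String) (shape : List Int) : List String :=
  words.foldl (fun result w =>
    if w.toList.length ≠ shape.length + 1 then result
    else if pvLoopA w.toList shape then result ++ [w] else result) []

-- ===== PORT B =====
-- tuple((ord(b) > ord(a)) - (ord(b) < ord(a)) for a, b in zip(w, w[1:]))
def pvSig (w : List Char) : List Int :=
  (w.zip w.tail).map (fun p =>
    ((if p.1 < p.2 then (1 : Int) else 0) - (if p.2 < p.1 then (1 : Int) else 0)))

-- index.setdefault(key, []).append(w)  inside 'for w in words: if w: …',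
-- then 'return index.get(tuple(shape), [])'
def words_with_given_shape_alt (words : List String) (shape : List Int) : List String :=
  let index := words.foldl (fun d w =>
    if w = "" then d
    else d.modify (pvSig w.toList) [] (· ++ [w])) PySem.Dict.empty
  index.getD shape []

-- ===== PRECONDITION & SPEC =====
def Spec_words_with_given_shape (words : List String) (shape : List Int) (out : List String) : Prop := out = words_with_given_shape_alt words shape
instance (words : List String) (shape : List Int) (out : List String) : Decidable (Spec_words_with_given_shape words shape out) := by unfold Spec_words_with_given_shape; infer_instance

-- ===== CLAIM =====
def Claim_equal_words_with_given_shape : Prop := ∀ (words : List String) (shape : List Int), Dom_words_with_given_shape words shape → Spec_words_with_given_shape words shape (words_with_given_shape words shape)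

-- ===== LEMMAS AND PROOFS =====

lemma pvCharLt_iff (a b : Char) : a < b ↔ a.toNat < b.toNat := by
  rw [Char.lt_def, UInt32.lt_iff_toNat_lt]; rfl

lemma pvCharEq_of_toNat {a b : Char} (h : a.toNat = b.toNat) : a = b := by
  apply Char.ext; exact UInt32.toNat_inj.mp h

lemma pvSig_cons (a b : Char) (rest : List Char) :
    pvSig (a :: b :: rest)
      = ((if a < b then (1 : Int) else 0) - (if b < a then (1 : Int) else 0)) :: pvSig (b :: rest) := by
  simp [pvSig]

lemma pvSig_length (cs : List Char) : (pvSig cs).length = cs.length - 1 := by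
  cases cs with
  | nil => simp [pvSig]
  | cons a t => simp [pvSig]

-- A's break-chain on one word equals element-wise comparison of B's signature with shape
lemma pvLoopA_eq_sig (cs : List Char) (ss : List Int) :
    pvLoopA cs ss = ((pvSig cs).zip ss).all (fun p => p.1 == p.2) := by
  induction ss generalizing cs with
  | nil =>
      cases cs with
      | nil => simp [pvLoopA, pvSig]
      | cons a t => cases t <;> simp [pvLoopA, pvSig]
  | cons s ss ih =>
      cases cs with
      | nil => simp [pvLoopA, pvSig]
      | cons a t =>
        cases t with
        | nil => simp [pvLoopA, pvSig]
        | cons b rest =>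
          have h := ih (b :: rest)
          rcases Nat.lt_trichotomy a.toNat b.toNat with hlt | heq | hgt
          · have hab : a < b := by rw [pvCharLt_iff]; exact hlt
            have hba : ¬ b < a := by rw [pvCharLt_iff]; omega
            have e1 : decide (b.toNat < a.toNat) = false := by
              rw [decide_eq_false_iff_not]; omega
            have e2 : decide ((b.toNat : Int) - (a.toNat : Int) = 0) = false := by
              rw [decide_eq_false_iff_not]; omega
            by_cases hs : s = 1
            · simp [pvLoopA, pvSig_cons, hab, hba, hs, h, hlt, e1, e2]
            · have hbe : (((1 : Int)) == s) = false := by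
                rw [beq_eq_false_iff_ne]; omega
              simp [pvLoopA, pvSig_cons, hab, hba, h, hlt, e1, e2, hbe]
              intro h1; exact absurd h1 hs
          · have hab : a = b := pvCharEq_of_toNat heq
            subst hab
            by_cases hs : s = 0
            · simp [pvLoopA, pvSig_cons, hs, h]
            · have hbe : (((0 : Int)) == s) = false := by
                rw [beq_eq_false_iff_ne]; omega
              simp [pvLoopA, pvSig_cons, hs, hbe]
          · have hab : b < a := by rw [pvCharLt_iff]; exact hgt
            have hba : ¬ a < b := by rw [pvCharLt_iff]; omega
            have e1 : decide (a.toNat < b.toNat) = false := by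
              rw [decide_eq_false_iff_not]; omega
            have e2 : decide ((b.toNat : Int) - (a.toNat : Int) = 0) = false := by
              rw [decide_eq_false_iff_not]; omega
            by_cases hs : s = -1
            · simp [pvLoopA, pvSig_cons, hab, hba, hs, h, hgt, e1, e2]
            · have hbe : (((-1 : Int)) == s) = false := by
                rw [beq_eq_false_iff_ne]; omega
              simp [pvLoopA, pvSig_cons, hab, hba, h, hgt, e1, e2, hbe]
              intro h1; exact absurd h1 hs

-- element-wise == on zipped equal-length lists is list equality
lemma pvZipAllEq (xs ys : List Int) (h : xs.length = ys.length) :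
    ((xs.zip ys).all (fun p => p.1 == p.2)) = (xs == ys) := by
  induction xs generalizing ys with
  | nil => cases ys with | nil => simp | cons y t => simp at h
  | cons x xt ih =>
      cases ys with
      | nil => simp at h
      | cons y yt =>
        have := ih yt (by simpa using h)
        simp [this]

-- A's per-word test equals B's grouping predicate
lemma pvPred_eq (shape : List Int) (w : String) :
    (w.toList.length == shape.length + 1 &&
      ((pvSig w.toList).zip shape).all (fun p => p.1 == p.2))
    = (!(w == "") && pvSig w.toList == shape) := by
  by_cases hl : w.toList.length = shape.length + 1
  · have hne : (w == "") = false := by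
      rw [beq_eq_false_iff_ne]; intro he; subst he; simp at hl
    have hlen : (pvSig w.toList).length = shape.length := by
      rw [pvSig_length, hl]; omega
    have hb : (w.toList.length == shape.length + 1) = true := by simpa using hl
    simp [hne, pvZipAllEq _ _ hlen]
    intro _
    have hwl : w.toList.length = w.length := String.length_toList
    omega
  · have hb : (w.toList.length == shape.length + 1) = false := by simpa using hl
    rw [hb, Bool.false_and]
    by_cases hw : w = ""
    · subst hw; simp
    · have hwe : (w == "") = false := by rwa [beq_eq_false_iff_ne]
      have : (pvSig w.toList == shape) = false := by
        rw [beq_eq_false_iff_ne]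
        intro he
        apply hl
        have := congrArg List.length he
        rw [pvSig_length] at this
        have hw0 : w.toList.length ≠ 0 := by
          intro h0; apply hw
          cases hx : w.toList with
          | nil => exact String.ext (by simp [hx])
          | cons a t => rw [hx] at h0; simp at h0
        omega
      simp [hwe, this]

-- the one-pass grouping dict, read back at any key, is a filter of the processed words
lemma pvIndex_getD (words : List String) (d : PySem.Dict (List Int) (List String)) (k : List Int) :
    (words.foldl (fun d w =>
      if w = "" then d else d.modify (pvSig w.toList) [] (· ++ [w])) d).getD k []
    = d.getD k [] ++ words.filter (fun w => !(w == "") && pvSig w.toList == k) := by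
  induction words generalizing d with
  | nil => simp
  | cons w ws ih =>
      by_cases hw : w = ""
      · subst hw; simp [ih]
      · have hwe : (w == "") = false := by rwa [beq_eq_false_iff_ne]
        rw [List.foldl_cons, if_neg hw, ih]
        rw [PySem.Dict.getD_modify]
        by_cases hk : k = pvSig w.toList
        · subst hk
          simp [hwe]
        · have h1 : (pvSig w.toList == k) = false := by
            rw [beq_eq_false_iff_ne]; exact fun he => hk he.symm
          simp [hk, h1, hwe]

-- the per-word body of A's loop as a single if over the combined test
lemma pvStep_eq (shape : List Int) (result : List String) (w : String) :
    (if w.toList.length ≠ shape.length + 1 then result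
     else if pvLoopA w.toList shape then result ++ [w] else result) =
    (if (!(w == "") && pvSig w.toList == shape) then result ++ [w] else result) := by
  rw [← pvPred_eq]
  by_cases hl : w.toList.length = shape.length + 1
  · have hn : ¬ (w.toList.length ≠ shape.length + 1) := by simpa using hl
    rw [if_neg hn, pvLoopA_eq_sig]
    have hb : (w.toList.length == shape.length + 1) = true := by simpa using hl
    simp only [hb, Bool.true_and]
  · rw [if_pos hl]
    have hb : (w.toList.length == shape.length + 1) = false := by simpa using hl
    simp only [hb, Bool.false_and, Bool.false_eq_true, if_false]

-- ===== VERDICT =====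
theorem words_with_given_shape_spec : Claim_equal_words_with_given_shape := by
  intro words shape _
  unfold Spec_words_with_given_shape words_with_given_shape words_with_given_shape_alt
  have hfe : (fun (result : List String) (w : String) =>
      if w.toList.length ≠ shape.length + 1 then result
      else if pvLoopA w.toList shape then result ++ [w] else result)
    = (fun (result : List String) (w : String) =>
      if (!(w == "") && pvSig w.toList == shape) then result ++ [w] else result) :=
    funext fun result => funext fun w => pvStep_eq shape result w
  rw [hfe]
  rw [pvIndex_getD words PySem.Dict.empty shape]
  simpa using PySem.List.foldl_append_if_eq_filter
    (l := words) (acc := ([] : List String))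
    (p := fun w => !(w == "") && pvSig w.toList == shape)
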